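-- pv_equiv track=rewrite | github.com/boscof/cs50 | boscof-cs50-2017-x-pset6-20170423T095251Z/credit.py | get_even_sum
-- ===== SOURCE A (Python) =====
-- def get_even_sum(n):
--     product=0
--     even_sum=0
--     #multiply every even digit by two and then take a cumulative sum
--     while n>0:
--         n//=10
--         product = (n % 10)*2
--         while product > 0:
--             even_sum += product % 10
--             product//=10
--         n//=10
--     return even_sum
-- ===== SOURCE B (Python) =====
-- def get_even_sum(n):
--     if n <= 0:
--         return 0
--     total = 0
--     for i, ch in enumerate(reversed(str(n))):
--         if i % 2 == 1:
--             d2 = 2 * (ord(ch) - 48)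
--             total += d2 if d2 < 10 else d2 - 9
--     return total
-- ===== Notes on version B (the rewrite author's own statement) =====
-- stated objective: alternative
-- what changed: Replaces A's arithmetic two-digits-per-step while loop with an inner digit-summing loop by a single pass over the reversed decimal string, using a closed-form fix-up for the doubled digit instead of the inner loop.
import Mathlib
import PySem

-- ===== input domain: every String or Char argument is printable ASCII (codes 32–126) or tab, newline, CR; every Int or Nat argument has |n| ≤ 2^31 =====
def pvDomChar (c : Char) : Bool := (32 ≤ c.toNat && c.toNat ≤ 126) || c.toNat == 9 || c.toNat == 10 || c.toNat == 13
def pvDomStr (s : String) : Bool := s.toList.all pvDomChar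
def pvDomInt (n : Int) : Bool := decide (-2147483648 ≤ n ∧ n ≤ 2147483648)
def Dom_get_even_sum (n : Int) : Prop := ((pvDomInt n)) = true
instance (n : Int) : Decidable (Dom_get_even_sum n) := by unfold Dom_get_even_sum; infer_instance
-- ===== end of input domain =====

-- B sums the Luhn-doubled digits at odd reversed positions of str(n) in one string pass with the
-- closed-form doubled-digit fix-up, replacing A's arithmetic loop with an inner digit-sum loop.

-- ===== PORT A =====
-- inner 'while product > 0' loop of A
def pyInnerA (product even_sum : Int) : Int :=
  if _h : product > 0 then
    pyInnerA (PySem.Int.floordiv product 10) (even_sum + PySem.Int.mod product 10)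
  else even_sum
termination_by product.toNat
decreasing_by
  rw [PySem.Int.floordiv_eq_ediv_of_pos (by omega : (0:Int) < 10)]; omega

-- outer 'while n > 0' loop of A
def pyOuterA (n even_sum : Int) : Int :=
  if _h : n > 0 then
    let n1 := PySem.Int.floordiv n 10
    let product := (PySem.Int.mod n1 10) * 2
    pyOuterA (PySem.Int.floordiv n1 10) (pyInnerA product even_sum)
  else even_sum
termination_by n.toNat
decreasing_by
  rw [PySem.Int.floordiv_eq_ediv_of_pos (by omega : (0:Int) < 10),
      PySem.Int.floordiv_eq_ediv_of_pos (by omega : (0:Int) < 10)]; omega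

def get_even_sum (n : Int) : Int := pyOuterA n 0

-- ===== PORT B =====
def get_even_sum_alt (n : Int) : Int :=
  if n ≤ 0 then 0
  else
    (PySem.List.enumerate (PySem.Int.toChars n).reverse 0).foldl
      (fun total p =>
        if PySem.Int.mod p.1 2 = 1 then
          let d2 := 2 * ((p.2.toNat : Int) - 48)
          total + (if d2 < 10 then d2 else d2 - 9)
        else total) 0

-- ===== PRECONDITION & SPEC =====
def Spec_get_even_sum (n : Int) (out : Int) : Prop := out = get_even_sum_alt n
instance (n : Int) (out : Int) : Decidable (Spec_get_even_sum n out) := by unfold Spec_get_even_sum; infer_instance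

-- ===== CLAIM (what is proved, stated in full; the proofs are below) =====
def Claim_equal_get_even_sum : Prop := ∀ (n : Int), Dom_get_even_sum n → Spec_get_even_sum n (get_even_sum n)

-- ===== LEMMAS AND PROOFS =====

-- doubled-digit contribution of one digit d (0 ≤ d ≤ 9)
def pvDD (d : Nat) : Int := if (2 * (d : Int)) < 10 then 2 * (d : Int) else 2 * (d : Int) - 9

-- reference sum: Luhn contribution of the digits (low-to-high) starting at position i
def pvOddSum (i : Nat) : List Nat → Int
  | [] => 0
  | d :: rest => (if i % 2 = 1 then pvDD d else 0) + pvOddSum (i + 1) rest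

theorem pvOddSum_parity (L : List Nat) : ∀ i j : Nat, i % 2 = j % 2 → pvOddSum i L = pvOddSum j L := by
  induction L with
  | nil => intros; rfl
  | cons d rest ih =>
    intro i j h
    simp only [pvOddSum, h, ih (i+1) (j+1) (by omega)]

theorem pyInnerA_eq (p s : Int) (h0 : 0 ≤ p) (h : p < 100) :
    pyInnerA p s = s + PySem.Int.mod p 10 + PySem.Int.floordiv p 10 := by
  have e : ∀ a : Int, PySem.Int.floordiv a 10 = a / 10 :=
    fun a => PySem.Int.floordiv_eq_ediv_of_pos (by omega)
  have e' : ∀ a : Int, PySem.Int.mod a 10 = a % 10 :=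
    fun a => PySem.Int.mod_eq_emod_of_pos (by omega)
  rw [pyInnerA]
  by_cases hp : p > 0
  · rw [dif_pos hp, pyInnerA]
    by_cases hq : PySem.Int.floordiv p 10 > 0
    · rw [dif_pos hq, pyInnerA]
      rw [dif_neg (by simp only [e] at *; omega :
        ¬ PySem.Int.floordiv (PySem.Int.floordiv p 10) 10 > 0)]
      simp only [e, e'] at *
      omega
    · rw [dif_neg hq]
      simp only [e, e'] at *
      omega
  · rw [dif_neg hp]
    simp only [e, e'] at *
    omega

theorem pyInnerA_dd (d : Nat) (hd : d ≤ 9) (s : Int) :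
    pyInnerA ((d : Int) * 2) s = s + pvDD d := by
  rw [pyInnerA_eq _ _ (by positivity) (by omega)]
  rw [PySem.Int.mod_eq_emod_of_pos (by omega), PySem.Int.floordiv_eq_ediv_of_pos (by omega)]
  unfold pvDD
  interval_cases d <;> norm_num <;> ring

theorem pyOuterA_spec (m : Nat) : ∀ s : Int, pyOuterA (m : Int) s = s + pvOddSum 0 (Nat.digits 10 m) := by
  induction m using Nat.strong_induction_on with
  | _ m ih =>
  intro s
  rcases Nat.eq_zero_or_pos m with hm | hm
  · subst hm; rw [pyOuterA]; simp [pvOddSum]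
  · rw [pyOuterA]
    rw [dif_pos (by exact_mod_cast hm : (m : Int) > 0)]
    have h1 : PySem.Int.floordiv (m : Int) 10 = ((m / 10 : Nat) : Int) := by
      exact_mod_cast PySem.Int.floordiv_natCast m 10
    have h2 : PySem.Int.mod ((m / 10 : Nat) : Int) 10 = ((m / 10 % 10 : Nat) : Int) := by
      exact_mod_cast PySem.Int.mod_natCast (m / 10) 10
    have h3 : PySem.Int.floordiv ((m / 10 : Nat) : Int) 10 = ((m / 10 / 10 : Nat) : Int) := by
      exact_mod_cast PySem.Int.floordiv_natCast (m / 10) 10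
    simp only [h1, h2, h3]
    rw [pyInnerA_dd (m / 10 % 10) (by omega) s]
    rw [ih (m / 10 / 10) (by have := Nat.div_lt_self hm (by omega : 1 < 10); omega)]
    rw [Nat.digits_def' (by omega : 1 < 10) hm]
    rcases Nat.eq_zero_or_pos (m / 10) with h10 | h10
    · rw [h10]
      simp [pvOddSum, pvDD]
    · rw [Nat.digits_def' (by omega : 1 < 10) h10]
      simp only [pvOddSum]
      rw [pvOddSum_parity _ 2 0 (by omega)]
      norm_num
      ring

-- ===== B-side =====

theorem toDigitsCore_acc (f : Nat) : ∀ (m : Nat) (acc : List Char),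
    Nat.toDigitsCore 10 f m acc = Nat.toDigitsCore 10 f m [] ++ acc := by
  induction f with
  | zero => intros; rfl
  | succ f ih =>
    intro m acc
    simp only [Nat.toDigitsCore]
    by_cases h : m / 10 = 0
    · simp [h]
    · simp only [h, if_false]
      rw [ih (m / 10) [Nat.digitChar (m % 10)], ih (m / 10) (Nat.digitChar (m % 10) :: acc)]
      simp

theorem toDigitsCore_digits (f : Nat) : ∀ m : Nat, 0 < m → m < f →
    Nat.toDigitsCore 10 f m [] = ((Nat.digits 10 m).map Nat.digitChar).reverse := by
  induction f with
  | zero => omega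
  | succ f ih =>
    intro m hm hf
    simp only [Nat.toDigitsCore]
    rw [Nat.digits_def' (by omega : 1 < 10) hm]
    by_cases h : m / 10 = 0
    · rw [h]
      simp [Nat.digits_zero]
    · simp only [h, if_false]
      rw [toDigitsCore_acc, ih (m / 10) (by omega) (by have := Nat.div_lt_self hm (by omega : 1 < 10); omega)]
      simp

theorem toChars_pos (m : Nat) (hm : 0 < m) :
    (PySem.Int.toChars (m : Int)).reverse = (Nat.digits 10 m).map Nat.digitChar := by
  simp only [PySem.Int.toChars]
  rw [if_neg (by omega)]
  simp only [Int.toNat_natCast, Nat.toDigits]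
  rw [toDigitsCore_digits (m + 1) m hm (by omega), List.reverse_reverse]

theorem digitChar_val (d : Nat) (hd : d < 10) : ((Nat.digitChar d).toNat : Int) - 48 = (d : Int) := by
  interval_cases d <;> decide

theorem foldB_spec (ds : List Nat) : ∀ (i : Nat) (acc : Int), (∀ d ∈ ds, d < 10) →
    (PySem.List.enumerate (ds.map Nat.digitChar) (i : Int)).foldl
      (fun total p =>
        if PySem.Int.mod p.1 2 = 1 then
          let d2 := 2 * ((p.2.toNat : Int) - 48)
          total + (if d2 < 10 then d2 else d2 - 9)
        else total) acc
    = acc + pvOddSum i ds := by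
  induction ds with
  | nil => intros; simp [PySem.List.enumerate_nil, pvOddSum]
  | cons d rest ih =>
    intro i acc hlt
    rw [List.map_cons, PySem.List.enumerate_cons, List.foldl_cons]
    have hcast : (i : Int) + 1 = ((i + 1 : Nat) : Int) := by push_cast; ring
    have hmod : PySem.Int.mod (i : Int) 2 = ((i % 2 : Nat) : Int) := by
      exact_mod_cast PySem.Int.mod_natCast i 2
    have hd := hlt d List.mem_cons_self
    simp only [hmod, hcast, digitChar_val d hd,
      ih (i + 1) _ (fun x hx => hlt x (List.mem_cons_of_mem d hx))]
    simp only [pvOddSum, pvDD]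
    by_cases hpar : i % 2 = 1
    · rw [if_pos (by exact_mod_cast hpar), if_pos hpar]
      ring
    · rw [if_neg (fun hc => hpar (by exact_mod_cast hc)), if_neg hpar]
      ring

-- ===== VERDICT (by name: the statement is the Claim_ definition above) =====
theorem get_even_sum_spec : Claim_equal_get_even_sum := by
  intro n _
  unfold Spec_get_even_sum get_even_sum get_even_sum_alt
  by_cases hn : n ≤ 0
  · rw [if_pos hn, pyOuterA]
    simp [show ¬ n > 0 by omega]
  · rw [if_neg hn]
    have hm : n = ((n.toNat : Nat) : Int) := by omega
    have hpos : 0 < n.toNat := by omega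
    rw [hm, pyOuterA_spec n.toNat 0, toChars_pos n.toNat hpos]
    have hb := foldB_spec (Nat.digits 10 n.toNat) 0 0
      (fun d hd => Nat.digits_lt_base (by omega) hd)
    simp only [Nat.cast_zero] at hb
    rw [hb]
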